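-- pv_equiv track=rewrite | github.com/Bryan375/DataAlchemy | data_alchemy_be/data_processing/validators.py | validate_column_names
-- ===== SOURCE A (Python) =====
-- from typing import Optional, List
--
-- def validate_column_names(names: List[str]) -> Optional[str]:
--     """Validate column names."""
--     # Check for empty names
--     if not all(names):
--         return "Empty column names are not allowed"
--
--     # Check for very long names
--     if any(len(name) > 100 for name in names):
--         return "Column names must be less than 100 characters"
--
--     # Check for invalid characters
--     invalid_chars = set('!@#$%^&*()+={}[]|\\:;"\'<>,?/')
--     if any(any(char in invalid_chars for char in name) for name in names):
--         return "Column names contain invalid characters"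
--
--     return None
-- ===== SOURCE B (Python) =====
-- INVALID_CHARS = set('!@#$%^&*()+={}[]|\\:;"\'<>,?/')
--
-- def validate_column_names(names):
--     """Validate column names: one fused pass setting three flags, then report by priority."""
--     has_empty = has_long = has_invalid = False
--     for name in names:
--         if not name:
--             has_empty = True
--         if len(name) > 100:
--             has_long = True
--         if any(c in INVALID_CHARS for c in name):
--             has_invalid = True
--     if has_empty:
--         return "Empty column names are not allowed"
--     if has_long:
--         return "Column names must be less than 100 characters"
--     if has_invalid:
--         return "Column names contain invalid characters"
--     return None
-- ===== Notes on version B (the rewrite author's own statement) =====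
-- stated objective: alternative
-- what changed: A makes three separate full passes over the list (all + two any-generator scans, each rebuilding/consulting the invalid set per call); B does one fused pass maintaining three boolean flags and reports the highest-priority message afterwards, with the invalid set built once at module level.
import Mathlib
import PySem

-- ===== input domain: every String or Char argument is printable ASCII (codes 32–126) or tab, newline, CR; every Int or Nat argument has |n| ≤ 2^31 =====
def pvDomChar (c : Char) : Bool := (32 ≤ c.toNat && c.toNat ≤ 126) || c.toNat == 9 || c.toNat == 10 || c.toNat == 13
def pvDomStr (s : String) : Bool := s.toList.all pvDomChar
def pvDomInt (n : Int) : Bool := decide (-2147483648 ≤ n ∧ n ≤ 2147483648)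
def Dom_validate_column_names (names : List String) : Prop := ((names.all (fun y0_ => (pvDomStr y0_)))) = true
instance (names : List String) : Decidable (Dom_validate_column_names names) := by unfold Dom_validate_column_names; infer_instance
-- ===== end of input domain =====

-- B performs one fused pass with three flags instead of A's three separate scans; return value only.

-- ===== PORT A =====
-- invalid_chars = set('!@#$%^&*()+={}[]|\\:;"\'<>,?/')
def pvInvalidChars : PySem.Set Char := PySem.Set.ofList "!@#$%^&*()+={}[]|\\:;\"'<>,?/".toList

def validate_column_names (names : List String) : Option String :=
  if !(names.all (fun name => !name.toList.isEmpty)) then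
    some "Empty column names are not allowed"
  else if names.any (fun name => decide (100 < PySem.Str.len name)) then
    some "Column names must be less than 100 characters"
  else if names.any (fun name => name.toList.any (fun c => PySem.Set.contains pvInvalidChars c)) then
    some "Column names contain invalid characters"
  else
    none

-- ===== PORT B =====
-- set built once at module level
def pvInvalidCharsB : PySem.Set Char := PySem.Set.ofList "!@#$%^&*()+={}[]|\\:;\"'<>,?/".toList

def pvFlagsStep (acc : Bool × Bool × Bool) (name : String) : Bool × Bool × Bool :=
  (acc.1 || name.toList.isEmpty,
   acc.2.1 || decide (100 < PySem.Str.len name),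
   acc.2.2 || name.toList.any (fun c => PySem.Set.contains pvInvalidCharsB c))

def validate_column_names_alt (names : List String) : Option String :=
  let flags := names.foldl pvFlagsStep (false, false, false)
  if flags.1 then some "Empty column names are not allowed"
  else if flags.2.1 then some "Column names must be less than 100 characters"
  else if flags.2.2 then some "Column names contain invalid characters"
  else none

-- ===== PRECONDITION & SPEC =====
def Spec_validate_column_names (names : List String) (out : Option String) : Prop := out = validate_column_names_alt names
instance (names : List String) (out : Option String) : Decidable (Spec_validate_column_names names out) := by unfold Spec_validate_column_names; infer_instance

-- ===== CLAIM (what is proved, stated in full; the proofs are below) =====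
def Claim_equal_validate_column_names : Prop := ∀ (names : List String), Dom_validate_column_names names → Spec_validate_column_names names (validate_column_names names)

-- ===== LEMMAS AND PROOFS =====
theorem pvFlags_foldl (names : List String) (a b c : Bool) :
    names.foldl pvFlagsStep (a, b, c) =
      (a || names.any (fun n => n.toList.isEmpty),
       b || names.any (fun n => decide (100 < PySem.Str.len n)),
       c || names.any (fun n => n.toList.any (fun ch => PySem.Set.contains pvInvalidCharsB ch))) := by
  induction names generalizing a b c with
  | nil => simp
  | cons h t ih =>
    simp only [List.foldl_cons, pvFlagsStep, List.any_cons]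
    rw [ih]
    simp [Bool.or_assoc]

-- ===== VERDICT (by name: the statement is the Claim_ definition above) =====
theorem validate_column_names_spec : Claim_equal_validate_column_names := by
  intro names _
  show _ = _
  unfold validate_column_names validate_column_names_alt
  rw [pvFlags_foldl]
  simp [pvInvalidChars, pvInvalidCharsB, List.all_eq_not_any_not]
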